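-- pv_equiv track=rewrite | github.com/helloxy96/CS5242_Project2020 | create_val_segs.py | get_labels_segs_dict
-- ===== SOURCE A (Python) =====
-- def get_labels_segs_dict(data_labels):
--     '''
--     get the segs list that contain each label
--     :param data_labels:
--     :return: {label1:[seg_idx1, seg_idx2,...], label2:[...]}
--     '''
--     labels_segments_dict = {}
--     for i in range(len(data_labels)):
--         seg_labels = data_labels[i]
--         for label in seg_labels:
--             if label in labels_segments_dict:
--                 if i not in labels_segments_dict[label]:
--                     labels_segments_dict[label].append(i)
--             else:
--                 labels_segments_dict[label] = [i]
--     return labels_segments_dict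
-- ===== SOURCE B (Python) =====
-- def get_labels_segs_dict(data_labels):
--     # pass 1: key order = first appearance of each label
--     order = []
--     seen = set()
--     for seg_labels in data_labels:
--         for label in seg_labels:
--             if label not in seen:
--                 seen.add(label)
--                 order.append(label)
--     # pass 2: for each label, scan all segments for membership
--     return {label: [i for i in range(len(data_labels)) if label in data_labels[i]]
--             for label in order}
-- ===== Notes on version B (the rewrite author's own statement) =====
-- stated objective: alternative
-- what changed: Replaces A's single pass that incrementally maintains per-label index lists with duplicate checks by two staged passes: first collect the labels in first-appearance order, then build each label's list by a fresh membership scan over all segments.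
import Mathlib
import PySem

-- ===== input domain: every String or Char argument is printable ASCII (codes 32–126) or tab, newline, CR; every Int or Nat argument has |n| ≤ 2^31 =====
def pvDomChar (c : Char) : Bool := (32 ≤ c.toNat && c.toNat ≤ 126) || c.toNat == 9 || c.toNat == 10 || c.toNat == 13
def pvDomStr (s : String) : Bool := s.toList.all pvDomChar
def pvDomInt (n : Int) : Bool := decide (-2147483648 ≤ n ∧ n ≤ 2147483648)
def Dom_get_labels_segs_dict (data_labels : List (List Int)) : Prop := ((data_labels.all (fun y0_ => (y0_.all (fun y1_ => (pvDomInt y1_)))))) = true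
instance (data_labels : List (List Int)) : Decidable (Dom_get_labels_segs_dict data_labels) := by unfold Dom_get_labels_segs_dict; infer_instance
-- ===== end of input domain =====

-- B recomputes the result in two staged passes (first-appearance key order, then a per-label
-- membership scan over all segments) instead of A's incremental dict maintenance; objective: alternative.


-- ===== PORT A =====
-- inner loop body of A: 'if label in dict: if i not in dict[label]: append i else: dict[label] = [i]'
def pvStepA (i : Int) (d : PySem.Dict Int (List Int)) (label : Int) : PySem.Dict Int (List Int) :=
  if d.contains label then
    if i ∈ d.getD label [] then d else d.insert label (d.getD label [] ++ [i])
  else d.insert label [i]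

def get_labels_segs_dict (data_labels : List (List Int)) : List (Int × List Int) :=
  -- for i in range(len(data_labels)): seg_labels = data_labels[i]; for label in seg_labels: …
  -- (data_labels[i] is always in range here, so pyGetD with dummy default [] is exact)
  ((PySem.List.pyRange 0 (data_labels.length : Int) 1).foldl
    (fun d i => (PySem.List.pyGetD data_labels i []).foldl (pvStepA i) d)
    PySem.Dict.empty).items

-- ===== PORT B =====
-- pass 2's comprehension body: [i for i in range(len(data_labels)) if label in data_labels[i]]
def pvIdxList (data_labels : List (List Int)) (label : Int) : List Int :=
  (PySem.List.pyRange 0 (data_labels.length : Int) 1).filter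
    (fun i => (PySem.List.pyGetD data_labels i []).contains label)

def get_labels_segs_dict_alt (data_labels : List (List Int)) : List (Int × List Int) :=
  -- pass 1: 'if label not in seen: seen.add(label); order.append(label)'
  let p := data_labels.foldl
    (fun (so : PySem.Set Int × List Int) seg_labels =>
      seg_labels.foldl
        (fun so label =>
          if so.1.contains label then so else (PySem.Set.add so.1 label, so.2 ++ [label])) so)
    (PySem.Set.empty, [])
  -- pass 2: dict comprehension over order
  (p.2.foldl
    (fun d label => d.insert label (pvIdxList data_labels label))
    PySem.Dict.empty).items

-- ===== PRECONDITION & SPEC =====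
def Spec_get_labels_segs_dict (data_labels : List (List Int)) (out : List (Int × List Int)) : Prop := out = get_labels_segs_dict_alt data_labels
instance (data_labels : List (List Int)) (out : List (Int × List Int)) : Decidable (Spec_get_labels_segs_dict data_labels out) := by unfold Spec_get_labels_segs_dict; infer_instance

-- ===== CLAIM (what is proved, stated in full; the proofs are below) =====
def Claim_equal_get_labels_segs_dict : Prop := ∀ (data_labels : List (List Int)), Dom_get_labels_segs_dict data_labels → Spec_get_labels_segs_dict data_labels (get_labels_segs_dict data_labels)

-- ===== LEMMAS AND PROOFS =====

-- A's dict build, in enumerate form (proved equal to the pyRange/pyGetD form in the verdict)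
def pvAD (data_labels : List (List Int)) : PySem.Dict Int (List Int) :=
  (PySem.List.enumerate data_labels).foldl (fun d q => q.2.foldl (pvStepA q.1) d) PySem.Dict.empty

-- ---- B side: pass 1 computes set(flatten) twice over ----
theorem pvPairFold_inner (seg : List Int) :
    ∀ s : PySem.Set Int,
      seg.foldl (fun (so : PySem.Set Int × List Int) label =>
          if so.1.contains label then so else (PySem.Set.add so.1 label, so.2 ++ [label])) (s, s)
        = (seg.foldl PySem.Set.add s, seg.foldl PySem.Set.add s) := by
  induction seg with
  | nil => intro s; rfl
  | cons x xs ih =>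
    intro s
    by_cases hx : PySem.Set.contains s x
    · have hm : x ∈ s := by simpa [PySem.Set.contains] using hx
      simp only [List.foldl_cons, hx, if_pos, PySem.Set.add_of_mem hm]
      exact ih s
    · have hm : x ∉ s := by simpa [PySem.Set.contains] using hx
      simp only [List.foldl_cons, hx, PySem.Set.add_of_not_mem hm]
      have := ih (s ++ [x])
      simpa [PySem.Set.add_of_not_mem hm] using this

theorem pvPairFold (dl : List (List Int)) :
    ∀ s : PySem.Set Int,
      dl.foldl (fun (so : PySem.Set Int × List Int) seg =>
          seg.foldl (fun so label =>
            if so.1.contains label then so else (PySem.Set.add so.1 label, so.2 ++ [label])) so) (s, s)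
        = (PySem.Set.update s dl.flatten, PySem.Set.update s dl.flatten) := by
  induction dl with
  | nil => intro s; simp [PySem.Set.update]
  | cons seg rest ih =>
    intro s
    simp only [List.foldl_cons, pvPairFold_inner seg s, ih, List.flatten_cons,
      PySem.Set.update, List.foldl_append]

-- ---- A side: keys ----
theorem pvKeys_stepA (n : Int) (d : PySem.Dict Int (List Int)) (x : Int) :
    (pvStepA n d x).keys = PySem.Set.add d.keys x := by
  unfold pvStepA
  by_cases hc : d.contains x
  · have hm : x ∈ d.keys := (PySem.Dict.contains_iff_mem_keys d x).1 hc
    split_ifs <;> simp [PySem.Dict.keys_insert_of_contains _ _ hc, PySem.Set.add_of_mem hm]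
  · have hm : x ∉ d.keys := fun h => hc ((PySem.Dict.contains_iff_mem_keys d x).2 h)
    simp [hc, PySem.Dict.keys_insert_of_not_contains _ _ (by simpa using hc),
      PySem.Set.add_of_not_mem hm]

theorem pvKeys_foldA (n : Int) (seg : List Int) :
    ∀ d : PySem.Dict Int (List Int),
      (seg.foldl (pvStepA n) d).keys = seg.foldl PySem.Set.add d.keys := by
  induction seg with
  | nil => intro d; rfl
  | cons x xs ih => intro d; simp only [List.foldl_cons, ih, pvKeys_stepA]

-- ---- A side: lookups ----
theorem pvGetD_stepA (n : Int) (d : PySem.Dict Int (List Int)) (x l : Int) :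
    (pvStepA n d x).getD l []
      = if l = x ∧ n ∉ d.getD x [] then d.getD x [] ++ [n] else d.getD l [] := by
  unfold pvStepA
  by_cases hc : d.contains x
  · by_cases hn : n ∈ d.getD x []
    · simp [hc, hn]
    · by_cases hl : l = x
      · subst hl; simp [hc, hn]
      · simp [hc, hn, hl, PySem.Dict.getD_insert]
  · have h0 : d.getD x ([] : List Int) = [] := PySem.Dict.getD_of_not_contains d [] (by simpa using hc)
    by_cases hl : l = x
    · subst hl; simp [hc, h0]
    · simp [hc, h0, hl, PySem.Dict.getD_insert]

theorem pvGetD_foldA_frozen (n : Int) (seg : List Int) :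
    ∀ (d : PySem.Dict Int (List Int)) (l : Int), n ∈ d.getD l [] →
      (seg.foldl (pvStepA n) d).getD l [] = d.getD l [] := by
  induction seg with
  | nil => intro d l _; rfl
  | cons x xs ih =>
    intro d l hn
    simp only [List.foldl_cons]
    have hstep : (pvStepA n d x).getD l [] = d.getD l [] := by
      rw [pvGetD_stepA]
      by_cases hl : l = x
      · subst hl; simp [hn]
      · simp [hl]
    rw [ih (pvStepA n d x) l (hstep ▸ hn), hstep]

theorem pvGetD_foldA (n : Int) (seg : List Int) :
    ∀ (d : PySem.Dict Int (List Int)) (l : Int), n ∉ d.getD l [] →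
      (seg.foldl (pvStepA n) d).getD l []
        = d.getD l [] ++ (if l ∈ seg then [n] else []) := by
  induction seg with
  | nil => intro d l _; simp
  | cons x xs ih =>
    intro d l hn
    simp only [List.foldl_cons]
    by_cases hl : l = x
    · subst hl
      have hstep : (pvStepA n d l).getD l [] = d.getD l [] ++ [n] := by
        rw [pvGetD_stepA]; simp [hn]
      rw [pvGetD_foldA_frozen n xs (pvStepA n d l) l (by rw [hstep]; simp), hstep]
      simp
    · have hstep : (pvStepA n d x).getD l [] = d.getD l [] := by
        rw [pvGetD_stepA]; simp [hl]
      rw [ih (pvStepA n d x) l (by rw [hstep]; exact hn), hstep]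
      simp [hl]

-- ---- A side: main characterisation by reverse induction on the segment list ----
theorem pvAD_spec (dl : List (List Int)) :
    (pvAD dl).keys = PySem.Set.ofList dl.flatten
      ∧ ∀ l : Int, (pvAD dl).getD l [] = pvIdxList dl l := by
  induction dl using List.reverseRecOn with
  | nil =>
    constructor
    · rfl
    · intro l; simp [pvAD, pvIdxList, PySem.Dict.getD_empty]
  | append_singleton P seg ih =>
    have hfold : pvAD (P ++ [seg]) = seg.foldl (pvStepA (P.length : Int)) (pvAD P) := by
      simp [pvAD, PySem.List.enumerate_append, List.foldl_append]
    have hlen : ((P ++ [seg]).length : Int) = (P.length : Int) + 1 := by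
      simp
    have hrange : PySem.List.pyRange 0 ((P ++ [seg]).length : Int) 1
        = PySem.List.pyRange 0 (P.length : Int) 1 ++ [(P.length : Int)] := by
      rw [hlen, PySem.List.pyRange_one_succ_right (by positivity)]
    have hgetP : ∀ i ∈ PySem.List.pyRange 0 (P.length : Int) 1,
        PySem.List.pyGetD (P ++ [seg]) i ([] : List Int) = PySem.List.pyGetD P i [] := by
      intro i hi
      rcases (PySem.List.mem_pyRange_one).1 hi with ⟨h0, h1⟩
      obtain ⟨k, rfl⟩ : ∃ k : Nat, i = (k : Int) := ⟨i.toNat, by omega⟩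
      have hk : k < P.length := by exact_mod_cast h1
      rw [PySem.List.pyGetD_natCast, PySem.List.pyGetD_natCast]
      simp [List.getD, List.getElem?_append_left hk]
    have hgetLast : PySem.List.pyGetD (P ++ [seg]) (P.length : Int) ([] : List Int) = seg := by
      rw [PySem.List.pyGetD_natCast]
      simp [List.getD]
    have hidx : ∀ l : Int, pvIdxList (P ++ [seg]) l
        = pvIdxList P l ++ (if l ∈ seg then [(P.length : Int)] else []) := by
      intro l
      unfold pvIdxList
      rw [hrange, List.filter_append]
      congr 1
      · exact List.filter_congr (fun i hi => by rw [hgetP i hi])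
      · simp only [List.filter_cons, List.filter_nil, hgetLast]
        by_cases hl : l ∈ seg <;> simp [hl]
    have hnotin : ∀ l : Int, (P.length : Int) ∉ (pvAD P).getD l [] := by
      intro l hmem
      rw [ih.2 l] at hmem
      have := (PySem.List.mem_pyRange_one).1 (List.mem_of_mem_filter hmem)
      omega
    refine ⟨?_, ?_⟩
    · rw [hfold, pvKeys_foldA, ih.1]
      simp [PySem.Set.ofList_eq_foldl, List.foldl_append]
    · intro l
      rw [hfold, pvGetD_foldA _ _ _ _ (hnotin l), ih.2 l, hidx l]

-- ===== VERDICT (by name: the statement is the Claim_ definition above) =====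
theorem get_labels_segs_dict_spec : Claim_equal_get_labels_segs_dict := by
  intro dl _
  unfold Spec_get_labels_segs_dict get_labels_segs_dict get_labels_segs_dict_alt
  -- A's pyRange/pyGetD loop is the enumerate loop
  have henum : PySem.List.enumerate dl
      = (PySem.List.pyRange 0 (dl.length : Int) 1).map
          (fun j => (j, PySem.List.pyGetD dl j ([] : List Int))) := by
    have := PySem.List.enumerate_eq_map_pyRange (xs := dl) ([] : List Int)
    simpa [PySem.List.len] using this
  have hA : ((PySem.List.pyRange 0 (dl.length : Int) 1).foldl
      (fun d i => (PySem.List.pyGetD dl i []).foldl (pvStepA i) d) PySem.Dict.empty) = pvAD dl := by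
    rw [pvAD, henum, List.foldl_map]
  rw [hA]
  -- B's pass 1 yields the first-appearance order = set(flatten dl)
  have hB : dl.foldl
      (fun (so : PySem.Set Int × List Int) seg =>
        seg.foldl (fun so label =>
          if so.1.contains label then so else (PySem.Set.add so.1 label, so.2 ++ [label])) so)
      (PySem.Set.empty, [])
      = (PySem.Set.ofList dl.flatten, PySem.Set.ofList dl.flatten) := by
    have := pvPairFold dl PySem.Set.empty
    simpa [PySem.Set.update, PySem.Set.ofList_eq_foldl, PySem.Set.empty] using this
  rw [hB]
  -- B's pass 2 over distinct fresh keys appends the pairs in order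
  have hnodup : (PySem.Set.ofList dl.flatten).Nodup := PySem.Set.nodup_ofList dl.flatten
  have hBitems : ((PySem.Set.ofList dl.flatten).foldl
      (fun d label => d.insert label (pvIdxList dl label)) PySem.Dict.empty).items
      = (PySem.Set.ofList dl.flatten).map (fun l => (l, pvIdxList dl l)) := by
    have := PySem.Dict.items_foldl_insert_fresh (l := PySem.Set.ofList dl.flatten)
      (k := fun l => l) (v := fun l => pvIdxList dl l) (d := PySem.Dict.empty)
      (by intro a _; simp [PySem.Dict.contains_empty]) (by simp [hnodup])
    simpa using this
  rw [hBitems]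
  -- A's dict items in the same shape
  obtain ⟨hkeys, hget⟩ := pvAD_spec dl
  rw [PySem.Dict.items_eq_map_keys (pvAD dl) (by rw [hkeys]; exact hnodup) ([] : List Int), hkeys]
  exact List.map_congr_left (fun l _ => by rw [hget l])
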